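-- pv_equiv track=rewrite | github.com/hiddenduck/University | bachelor's/LA2/Treino3/espaca.py | auxMemo
-- ===== SOURCE A (Python) =====
-- def auxMemo(nova, frase, palavras, ha):
--     if nova in ha:
--         return ha[nova]
--
--     l = [""]
--     for palavra in palavras:
--         if frase.find(nova + palavra) == 0:
--             ha[nova + " " + palavra] = palavra + " " + auxMemo(nova + palavra, frase, palavras, ha)
--             l.append(ha[nova + " " + palavra])
--
--     ha[nova] = max(l, key=lambda x: len(x))
--     return ha[nova]
-- ===== SOURCE B (Python) =====
-- def auxMemo(nova, frase, palavras, ha):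
--     # Bottom-up DP over positions of frase (equivalence is about the return
--     # value only: A also mutates ha in place, B leaves it untouched).
--     if nova in ha:
--         return ha[nova]
--     if not frase.startswith(nova):
--         return ""
--     n = len(frase)
--     best = [""] * (n + 1)
--     for i in range(n, len(nova) - 1, -1):
--         pref = frase[:i]
--         if pref in ha:
--             best[i] = ha[pref]
--             continue
--         res = ""
--         for p in palavras:
--             if frase.startswith(p, i):
--                 cand = p + " " + best[i + len(p)]
--                 if len(cand) > len(res):
--                     res = cand
--         best[i] = res
--     return best[len(nova)]
-- ===== Notes on version B (the rewrite author's own statement) =====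
-- stated objective: faster
-- what changed: Replaces A's top-down recursion memoised in a shared string-keyed dict (testing each word with frase.find over the whole string and building candidate lists) by an iterative bottom-up DP table indexed by position, filled right-to-left with O(1)-offset substring tests and a running best instead of max over a list.
-- outside the precondition, e.g. on auxMemo('', '  ', [' ', '  '], {}): A returns '       ', B returns '    '
import Mathlib
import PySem

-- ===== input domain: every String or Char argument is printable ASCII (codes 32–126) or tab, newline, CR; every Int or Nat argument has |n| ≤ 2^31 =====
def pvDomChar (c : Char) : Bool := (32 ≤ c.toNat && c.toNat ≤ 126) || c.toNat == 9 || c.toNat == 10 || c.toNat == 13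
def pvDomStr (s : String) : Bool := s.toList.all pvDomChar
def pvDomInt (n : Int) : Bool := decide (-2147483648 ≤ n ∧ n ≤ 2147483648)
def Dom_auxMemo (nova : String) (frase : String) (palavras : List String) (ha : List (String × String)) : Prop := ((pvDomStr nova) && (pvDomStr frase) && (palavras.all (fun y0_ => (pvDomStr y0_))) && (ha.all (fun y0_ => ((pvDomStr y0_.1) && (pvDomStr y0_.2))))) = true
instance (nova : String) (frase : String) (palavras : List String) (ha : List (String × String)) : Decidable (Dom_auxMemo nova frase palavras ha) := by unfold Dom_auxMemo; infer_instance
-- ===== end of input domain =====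

-- B replaces A's recursive string-keyed memoisation (O(n^2·|palavras|) with find over the whole
-- string) by a bottom-up DP over positions with O(1) substring tests; equivalence is about the
-- RETURN value only (A also mutates ha in place, B leaves it untouched).


-- ===== PORT A =====
-- A is recursive and mutates the memo dict `ha`; the port threads the dict state explicitly and
-- uses a fuel counter (the Python recursion depth is bounded by len(frase)+1 on every input where
-- it terminates, since each recursive call strictly lengthens `nova` within `frase`).
mutual
def auxA (frase : String) (palavras : List String) :
    Nat → String → PySem.Dict String String → String × PySem.Dict String String
  | 0, _, d => ("", d)                       -- fuel exhausted: unreachable under Pre_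
  | fuel + 1, nova, d =>
    match d.get? nova with                   -- if nova in ha: return ha[nova]
    | some v => (v, d)
    | none =>
      let r := auxALoop frase palavras fuel nova palavras [""] d     -- l = [""] ; for palavra in palavras: …
      let m := (PySem.List.max? r.1 PySem.Str.len).getD ""           -- max(l, key=lambda x: len(x)); l is nonempty
      let d2 := r.2.insert nova m                                    -- ha[nova] = …
      (d2.getD nova "", d2)                                          -- return ha[nova]
  termination_by fuel _ _ => (fuel, 0)

def auxALoop (frase : String) (palavras : List String) (fuel : Nat) (nova : String) :
    List String → List String → PySem.Dict String String → List String × PySem.Dict String String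
  | [], l, d => (l, d)
  | p :: rest, l, d =>
    if PySem.Str.find frase (nova ++ p) == 0 then                    -- if frase.find(nova+palavra) == 0:
      let r := auxA frase palavras fuel (nova ++ p) d                -- recursive call
      let d2 := r.2.insert (nova ++ " " ++ p) (p ++ " " ++ r.1)      -- ha[nova+" "+palavra] = palavra+" "+…
      auxALoop frase palavras fuel nova rest
        (l ++ [d2.getD (nova ++ " " ++ p) ""]) d2                    -- l.append(ha[nova+" "+palavra])
    else auxALoop frase palavras fuel nova rest l d
  termination_by rem _ _ => (fuel, rem.length + 1)
end

def auxMemo (nova : String) (frase : String) (palavras : List String) (ha : List (String × String)) : String :=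
  (auxA frase palavras (frase.toList.length + 1) nova (PySem.Dict.mk ha)).1

-- ===== PORT B =====
-- Source B: bottom-up DP table best[i] over positions of frase, filled right to left.
def altStep (frase : String) (palavras : List String) (d : PySem.Dict String String)
    (best : List String) (i : Int) : List String :=
  let pref := PySem.Str.slice frase none (some i)                    -- pref = frase[:i]
  match d.get? pref with
  | some v => PySem.List.pySetD best i v                             -- best[i] = ha[pref]
  | none =>
    let res := palavras.foldl
      (fun res p =>
        if PySem.Str.slice frase (some i) (some (i + PySem.Str.len p)) == p then   -- frase[i:i+len(p)] == p
          let cand := p ++ " " ++ PySem.List.pyGetD best (i + PySem.Str.len p) ""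
          if PySem.Str.len res < PySem.Str.len cand then cand else res             -- if len(cand) > len(res)
        else res) ""
    PySem.List.pySetD best i res                                     -- best[i] = res

def auxMemo_alt (nova : String) (frase : String) (palavras : List String) (ha : List (String × String)) : String :=
  let d : PySem.Dict String String := PySem.Dict.mk ha
  match d.get? nova with                                             -- if nova in ha: return ha[nova]
  | some v => v
  | none =>
    if PySem.Str.startswith frase nova then
      let n : Int := PySem.Str.len frase
      let best0 : List String := PySem.List.pyRepeat [""] (n + 1)    -- best = [""] * (n+1)
      let best := (PySem.List.pyRange n (PySem.Str.len nova - 1) (-1)).foldl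
        (altStep frase palavras d) best0                             -- for i in range(n, len(nova)-1, -1)
      PySem.List.pyGetD best (PySem.Str.len nova) ""                 -- return best[len(nova)]
    else ""                                                          -- no word can match at all

-- ===== PRECONDITION & SPEC =====
-- Pre_ excludes (a) inputs where A raises RecursionError: "" in palavras while frase starts with
-- nova and nova is not a key of ha (A then recurses forever on the empty word); and (b) inputs
-- where A actually recurses (nova an unmemoised prefix of frase) while a palavra that contains a
-- space occurs as a substring of frase: there A still returns a value, but it is an accident of
-- A's space-delimited bookkeeping keys ha[nova+" "+palavra], which can then collide with genuine
-- memo lookups (see cites in claim.json).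
def Pre_auxMemo (nova : String) (frase : String) (palavras : List String) (ha : List (String × String)) : Prop :=
  ("" ∈ palavras → ¬ nova.toList <+: frase.toList ∨ ((PySem.Dict.mk ha).get? nova).isSome = true)
  ∧ (nova.toList <+: frase.toList → ((PySem.Dict.mk ha).get? nova).isSome = true ∨
      ∀ p ∈ palavras, ' ' ∈ p.toList → ¬ p.toList <:+: frase.toList)
instance (nova : String) (frase : String) (palavras : List String) (ha : List (String × String)) : Decidable (Pre_auxMemo nova frase palavras ha) := by unfold Pre_auxMemo; infer_instance

def pvWitness_auxMemo : String × String × List String × (List (String × String)) :=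
  ("a", "ab", ["a", "b"], [])

def Spec_auxMemo (nova : String) (frase : String) (palavras : List String) (ha : List (String × String)) (out : String) : Prop := out = auxMemo_alt nova frase palavras ha
instance (nova : String) (frase : String) (palavras : List String) (ha : List (String × String)) (out : String) : Decidable (Spec_auxMemo nova frase palavras ha out) := by unfold Spec_auxMemo; infer_instance

-- ===== CLAIM (what is proved, stated in full; the proofs are below) =====
def Claim_equal_auxMemo : Prop := ∀ (nova : String) (frase : String) (palavras : List String) (ha : List (String × String)), Dom_auxMemo nova frase palavras ha → Pre_auxMemo nova frase palavras ha → Spec_auxMemo nova frase palavras ha (auxMemo nova frase palavras ha)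

-- ===== LEMMAS AND PROOFS =====

-- The common pure specification: specG i is the value of the segmentation problem at position i
-- of frase (first looking the prefix up in the INITIAL dict d0), specLoop its inner loop.
mutual
def specG (frase : String) (palavras : List String) (d0 : PySem.Dict String String) (i : Nat) : String :=
  match d0.get? (String.ofList (frase.toList.take i)) with
  | some v => v
  | none => specLoop frase palavras d0 i palavras ""
  termination_by (frase.toList.length + 1 - i, palavras.length + 1)

def specLoop (frase : String) (palavras : List String) (d0 : PySem.Dict String String) (i : Nat) :
    List String → String → String
  | [], res => res
  | p :: rest, res =>
    if h : (frase.toList.drop i).take p.toList.length = p.toList ∧ 0 < p.toList.length then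
      let cand := p ++ " " ++ specG frase palavras d0 (i + p.toList.length)
      specLoop frase palavras d0 i rest
        (if PySem.Str.len res < PySem.Str.len cand then cand else res)
    else specLoop frase palavras d0 i rest res
  termination_by rest _ => (frase.toList.length + 1 - i, rest.length)
  decreasing_by
    · have hl := congrArg List.length h.1
      simp [List.length_take, List.length_drop, String.length_toList] at hl
      have e1 : p.toList.length = p.length := @String.length_toList p
      simp_wf; left; omega
    · simp_wf; right; omega
    · simp_wf; right; omega
end

-- the state invariant of A's dict relative to the initial dict d0 (a is the top-level nova)
def InvD (frase : String) (palavras : List String) (d0 : PySem.Dict String String)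
    (Clean : String → Prop) (d : PySem.Dict String String) : Prop :=
  ∀ k : String, Clean k →
    d.get? k = d0.get? k ∨
    (d0.get? k = none ∧ k.toList = frase.toList.take k.toList.length ∧
      d.get? k = some (specG frase palavras d0 k.toList.length))

def pvSel (r c : String) : String := if PySem.Str.len r < PySem.Str.len c then c else r

def cands (frase : String) (palavras : List String) (d0 : PySem.Dict String String)
    (nova : String) (i : Nat) (rest : List String) : List String :=
  rest.filterMap (fun p =>
    if (nova.toList ++ p.toList) <+: frase.toList then
      some (p ++ " " ++ specG frase palavras d0 (i + p.toList.length))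
    else none)

lemma find_zero_iff (s k : String) :
    (PySem.Str.find s k == 0) = true ↔ k.toList <+: s.toList := by
  rw [PySem.Str.find_eq, beq_iff_eq]
  constructor
  · intro h
    have h0 : (0:Int) ≤ PySem.Chars.find s.toList k.toList := by omega
    have := (PySem.Chars.find_spec h0).1
    simpa [h] using this
  · intro h
    have hinf : k.toList <:+: s.toList := h.isInfix
    have h0 : (0:Int) ≤ PySem.Chars.find s.toList k.toList :=
      (PySem.Chars.find_nonneg_iff _ _).mpr hinf
    by_contra hne
    have hpos : 0 < (PySem.Chars.find s.toList k.toList).toNat := by omega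
    exact ((PySem.Chars.find_spec h0).2 0 hpos) (by simpa using h)

lemma max?_cons_foldl : ∀ (t : List String) (x : String),
    (PySem.List.max? (x :: t) PySem.Str.len).getD "" = t.foldl pvSel x := by
  intro t
  induction t with
  | nil => intro x; rfl
  | cons c t ih =>
    intro x
    have h := ih (pvSel x c)
    simp only [PySem.List.max?, List.foldl_cons] at h ⊢
    rw [show (if PySem.Str.len x < PySem.Str.len c then some c else some x) = some (pvSel x c) by
      unfold pvSel; split <;> rfl]
    exact h

-- the word-match condition, seen from position i (used by both directions of the proof)
lemma cond_iff (frase : String) (i : Nat) (hi : i ≤ frase.toList.length) (p : String) :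
    ((frase.toList.take i ++ p.toList) <+: frase.toList) ↔
      (frase.toList.drop i).take p.toList.length = p.toList := by
  have hi' : frase.toList.length = frase.length := @String.length_toList frase
  constructor
  · intro h
    have hlen : (frase.toList.take i ++ p.toList).length = i + p.toList.length := by
      simp [List.length_take]; omega
    have heq := List.prefix_iff_eq_take.mp h
    rw [hlen, List.take_add] at heq
    exact ((List.append_inj heq rfl).2).symm
  · intro h
    have h2 : frase.toList.drop i = p.toList ++ frase.toList.drop (i + p.toList.length) := by
      conv_lhs => rw [← List.take_append_drop p.toList.length (frase.toList.drop i)]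
      rw [h, List.drop_drop, Nat.add_comm]
    have h1 : p.toList <+: frase.toList.drop i := ⟨_, h2.symm⟩
    calc frase.toList.take i ++ p.toList
        <+: frase.toList.take i ++ frase.toList.drop i := by
          exact (List.prefix_append_right_inj _).mpr h1
      _ = frase.toList := List.take_append_drop _ _

lemma specLoop_eq_foldl (frase : String) (palavras : List String) (d0 : PySem.Dict String String)
    (nova : String) (i : Nat) (hpre : nova.toList = frase.toList.take i)
    (hi : i ≤ frase.toList.length) (hno : "" ∉ palavras) :
    ∀ (rest : List String), rest ⊆ palavras → ∀ res,
      specLoop frase palavras d0 i rest res = (cands frase palavras d0 nova i rest).foldl pvSel res := by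
  intro rest
  induction rest with
  | nil => intro _ res; rw [specLoop]; rfl
  | cons p rest ih =>
    intro hsub res
    have hp : p ∈ palavras := hsub (List.mem_cons_self ..)
    have hlp : 0 < p.toList.length := by
      cases hq : p.toList with
      | nil =>
        exact absurd (by rwa [show p = "" from String.toList_inj.mp (by simp [hq])] at hp) hno
      | cons a l => simp
    have hcond : ((nova.toList ++ p.toList) <+: frase.toList) ↔
        (frase.toList.drop i).take p.toList.length = p.toList := by
      rw [hpre]; exact cond_iff frase i hi p
    rw [specLoop]
    by_cases hc : (frase.toList.drop i).take p.toList.length = p.toList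
    · rw [dif_pos ⟨hc, hlp⟩]
      rw [show cands frase palavras d0 nova i (p :: rest) =
          (p ++ " " ++ specG frase palavras d0 (i + p.toList.length)) :: cands frase palavras d0 nova i rest by
        unfold cands; simp only [List.filterMap_cons]; rw [if_pos (hcond.mpr hc)]]
      rw [List.foldl_cons]
      exact ih (fun q hq => hsub (List.mem_cons_of_mem _ hq)) _
    · rw [dif_neg (by intro hb; exact hc hb.1)]
      rw [show cands frase palavras d0 nova i (p :: rest) = cands frase palavras d0 nova i rest by
        unfold cands; simp only [List.filterMap_cons]; rw [if_neg (fun hb => hc (hcond.mp hb))]]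
      exact ih (fun q hq => hsub (List.mem_cons_of_mem _ hq)) res

lemma loopA_none (frase : String) (palavras : List String) (fuel : Nat) (nova : String) :
    ∀ (rest : List String), (∀ p ∈ rest, ¬ ((nova ++ p).toList <+: frase.toList)) →
    ∀ l d, auxALoop frase palavras fuel nova rest l d = (l, d) := by
  intro rest
  induction rest with
  | nil => intro _ l d; rw [auxALoop]
  | cons p rest ih =>
    intro h l d
    rw [auxALoop]
    rw [if_neg (by
      rw [find_zero_iff]
      exact h p (List.mem_cons_self ..))]
    exact ih (fun q hq => h q (List.mem_cons_of_mem _ hq)) l d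

-- Clean abstracts the set of keys A can ever look up below this call: recursion steps stay
-- Clean (HC1), bookkeeping keys nova ++ " " ++ p are never Clean (HC2), so they are invisible.
lemma mainA (frase : String) (palavras : List String) (d0 : PySem.Dict String String)
    (Clean : String → Prop)
    (hno : "" ∉ palavras)
    (HC1 : ∀ (nova p : String), p ∈ palavras → Clean nova →
      (nova ++ p).toList <+: frase.toList → Clean (nova ++ p))
    (HC2 : ∀ (nova p : String), p ∈ palavras → Clean nova → ¬ Clean (nova ++ " " ++ p)) :
    ∀ (fuel : Nat) (i : Nat) (nova : String) (d : PySem.Dict String String),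
      nova.toList = frase.toList.take i → i ≤ frase.toList.length →
      Clean nova →
      frase.toList.length + 1 - i ≤ fuel →
      InvD frase palavras d0 Clean d →
      (auxA frase palavras fuel nova d).1 = specG frase palavras d0 i ∧
      InvD frase palavras d0 Clean (auxA frase palavras fuel nova d).2 := by
  intro fuel
  induction fuel with
  | zero => intro i nova d _ hi _ hfuel _; omega
  | succ fuel ih =>
    intro i nova d hpre hi hclean hfuel hinv
    have hfl : frase.toList.length = frase.length := @String.length_toList frase
    have hnkey : String.ofList (frase.toList.take i) = nova := by
      rw [← hpre, String.ofList_toList]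
    have hlen_nova : nova.toList.length = i := by
      rw [hpre]; simp [List.length_take]; omega
    rw [auxA]
    cases hm : d.get? nova with
    | some v =>
      simp only [hm]
      refine ⟨?_, hinv⟩
      rcases hinv nova hclean with hL | hR
      · have h0 : d0.get? nova = some v := by rw [← hL]; exact hm
        rw [specG, hnkey, h0]
      · rw [hm] at hR
        have := hR.2.2
        rw [hlen_nova] at this
        exact (Option.some.injEq ..).mp this
    | none =>
      simp only [hm]
      have hd0 : d0.get? nova = none := by
        rcases hinv nova hclean with hL | hR
        · rw [← hL]; exact hm
        · rw [hm] at hR; exact absurd hR.2.2 (by simp)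
      have loopL : ∀ (rest : List String), rest ⊆ palavras →
          ∀ (l : List String) (d' : PySem.Dict String String),
          InvD frase palavras d0 Clean d' →
          (auxALoop frase palavras fuel nova rest l d').1 =
            l ++ cands frase palavras d0 nova i rest ∧
          InvD frase palavras d0 Clean (auxALoop frase palavras fuel nova rest l d').2 := by
        intro rest
        induction rest with
        | nil => intro _ l d' hinv'; rw [auxALoop]; unfold cands; simpa using hinv'
        | cons p rest ihr =>
          intro hsub l d' hinv'
          have hp : p ∈ palavras := hsub (List.mem_cons_self ..)
          have hpl : 0 < p.toList.length := by
            cases hq : p.toList with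
            | nil =>
              exact absurd (by rwa [show p = "" from String.toList_inj.mp (by simp [hq])] at hp) hno
            | cons c l' => simp
          rw [auxALoop]
          by_cases hc : (nova ++ p).toList <+: frase.toList
          · rw [if_pos (by rw [find_zero_iff]; exact hc)]
            have hql : (nova ++ p).toList.length = i + p.toList.length := by
              simp [String.toList_append, hlen_nova]
            have htake : (nova ++ p).toList = frase.toList.take (i + p.toList.length) := by
              have h' := List.prefix_iff_eq_take.mp hc; rw [hql] at h'; exact h'
            have hi' : i + p.toList.length ≤ frase.toList.length := by
              have h' := hc.length_le; rw [hql] at h'; exact h'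
            have hclean' : Clean (nova ++ p) := HC1 nova p hp hclean hc
            have hfuel' : frase.toList.length + 1 - (i + p.toList.length) ≤ fuel := by omega
            have hrec := ih (i + p.toList.length) (nova ++ p) d' htake hi' hclean' hfuel' hinv'
            have hkb : ∀ k : String, Clean k → k ≠ nova ++ " " ++ p := by
              intro k hck hkeq
              exact (HC2 nova p hp hclean) (hkeq ▸ hck)
            have hinv2 : InvD frase palavras d0 Clean
                ((auxA frase palavras fuel (nova ++ p) d').2.insert (nova ++ " " ++ p)
                  (p ++ " " ++ (auxA frase palavras fuel (nova ++ p) d').1)) := by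
              intro k hkcl
              rw [PySem.Dict.get?_insert_of_ne _ _ (hkb k hkcl)]
              exact hrec.2 k hkcl
            have happ : (((auxA frase palavras fuel (nova ++ p) d').2.insert (nova ++ " " ++ p)
                  (p ++ " " ++ (auxA frase palavras fuel (nova ++ p) d').1))).getD
                  (nova ++ " " ++ p) "" =
                p ++ " " ++ specG frase palavras d0 (i + p.toList.length) := by
              rw [PySem.Dict.getD_insert_self, hrec.1]
            obtain ⟨h1, h2⟩ := ihr (fun q hq => hsub (List.mem_cons_of_mem _ hq))
              (l ++ [(((auxA frase palavras fuel (nova ++ p) d').2.insert (nova ++ " " ++ p)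
                  (p ++ " " ++ (auxA frase palavras fuel (nova ++ p) d').1))).getD
                  (nova ++ " " ++ p) ""]) _ hinv2
            refine ⟨?_, h2⟩
            rw [h1, happ]
            rw [show cands frase palavras d0 nova i (p :: rest) =
                (p ++ " " ++ specG frase palavras d0 (i + p.toList.length)) ::
                  cands frase palavras d0 nova i rest by
              unfold cands; simp only [List.filterMap_cons]
              rw [if_pos (by rw [← String.toList_append]; exact hc)]]
            simp
          · rw [if_neg (by rw [find_zero_iff]; exact hc)]
            obtain ⟨h1, h2⟩ := ihr (fun q hq => hsub (List.mem_cons_of_mem _ hq)) l d' hinv'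
            refine ⟨?_, h2⟩
            rw [h1]
            rw [show cands frase palavras d0 nova i (p :: rest) =
                cands frase palavras d0 nova i rest by
              unfold cands; simp only [List.filterMap_cons]
              rw [if_neg (by rw [← String.toList_append]; exact hc)]]
      obtain ⟨hl1, hl2⟩ := loopL palavras (fun _ h => h) [""] d hinv
      have hm1 : (PySem.List.max? (auxALoop frase palavras fuel nova palavras [""] d).1
          PySem.Str.len).getD "" = specG frase palavras d0 i := by
        rw [hl1]
        rw [show ([""] ++ cands frase palavras d0 nova i palavras) =
            "" :: cands frase palavras d0 nova i palavras from rfl]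
        rw [max?_cons_foldl]
        rw [← specLoop_eq_foldl frase palavras d0 nova i hpre hi hno palavras (fun _ h => h) ""]
        rw [specG, hnkey, hd0]
      refine ⟨?_, ?_⟩
      · rw [PySem.Dict.getD_insert_self, hm1]
      · intro k hkcl
        by_cases hk : k = nova
        · subst hk
          right
          refine ⟨hd0, ?_, ?_⟩
          · rw [hlen_nova, hpre]
          · rw [PySem.Dict.get?_insert_self, hm1, hlen_nova]
        · rw [PySem.Dict.get?_insert_of_ne _ _ hk]
          exact hl2 k hkcl

lemma loopB (frase : String) (palavras : List String) (d0 : PySem.Dict String String)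
    (hno : "" ∉ palavras) :
    ∀ (c j : Nat) (t : List String), j + c ≤ frase.toList.length + 1 →
      t.length = frase.toList.length + 1 →
      (∀ idx : Nat, j + c ≤ idx → idx ≤ frase.toList.length →
        t.getD idx "" = specG frase palavras d0 idx) →
      (((PySem.List.pyRange ((j : Int) + (c : Int) - 1) ((j : Int) - 1) (-1)).foldl
          (altStep frase palavras d0) t).length = frase.toList.length + 1 ∧
       ∀ idx : Nat, j ≤ idx → idx ≤ frase.toList.length →
        ((PySem.List.pyRange ((j : Int) + (c : Int) - 1) ((j : Int) - 1) (-1)).foldl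
          (altStep frase palavras d0) t).getD idx "" = specG frase palavras d0 idx) := by
  intro c
  induction c with
  | zero =>
    intro j t hjc hlen hidx
    rw [show ((j : Int) + ((0:Nat) : Int) - 1) = (j : Int) - 1 by push_cast; ring]
    rw [PySem.List.pyRange_neg_one_eq_nil (le_refl _)]
    exact ⟨hlen, fun idx h1 h2 => hidx idx (by omega) h2⟩
  | succ c ihc =>
    intro j t hjc hlen hidx
    have hcons : PySem.List.pyRange ((j : Int) + ((c + 1 : Nat) : Int) - 1) ((j : Int) - 1) (-1) =
        ((j + c : Nat) : Int) :: PySem.List.pyRange (((j + c : Nat) : Int) - 1) ((j : Int) - 1) (-1) := by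
      rw [show ((j : Int) + ((c + 1 : Nat) : Int) - 1) = ((j + c : Nat) : Int) by push_cast; ring]
      exact PySem.List.pyRange_neg_one_cons (by push_cast; omega)
    rw [hcons, List.foldl_cons]
    have hi0n : j + c ≤ frase.toList.length := by omega
    -- the step computes specG (j+c) and sets it at position j+c
    have hpref : (PySem.Str.slice frase none (some ((j + c : Nat) : Int))).toList =
        frase.toList.take (j + c) := by
      rw [PySem.Str.toList_slice, PySem.Chars.slice_eq_listSlice, PySem.List.slice_to_natCast]
    have hkey : String.ofList (frase.toList.take (j + c)) =
        PySem.Str.slice frase none (some ((j + c : Nat) : Int)) := by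
      rw [← hpref, String.ofList_toList]
    have hstep : (altStep frase palavras d0 t ((j + c : Nat) : Int)).length =
          frase.toList.length + 1 ∧
        ∀ idx : Nat, j + c ≤ idx → idx ≤ frase.toList.length →
          (altStep frase palavras d0 t ((j + c : Nat) : Int)).getD idx "" =
            specG frase palavras d0 idx := by
      rw [altStep]
      cases hg : d0.get? (PySem.Str.slice frase none (some ((j + c : Nat) : Int))) with
      | some v =>
        simp only [PySem.List.pySetD_natCast]
        refine ⟨by simp [hlen], ?_⟩
        intro idx h1 h2
        rcases Nat.eq_or_lt_of_le h1 with he | hlt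
        · rw [← he]
          rw [List.getD_eq_getElem?_getD, List.getElem?_set, if_pos rfl, if_pos (by omega)]
          rw [specG, hkey, hg]
          rfl
        · rw [List.getD_eq_getElem?_getD, List.getElem?_set, if_neg (by omega),
            ← List.getD_eq_getElem?_getD]
          exact hidx idx (by omega) h2
      | none =>
        simp only [PySem.List.pySetD_natCast]
        have hin : ∀ (rest : List String), rest ⊆ palavras → ∀ res : String,
            rest.foldl (fun res p =>
              if PySem.Str.slice frase (some ((j + c : Nat) : Int))
                  (some (((j + c : Nat) : Int) + PySem.Str.len p)) == p then
                let cand := p ++ " " ++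
                  PySem.List.pyGetD t (((j + c : Nat) : Int) + PySem.Str.len p) ""
                if PySem.Str.len res < PySem.Str.len cand then cand else res
              else res) res = specLoop frase palavras d0 (j + c) rest res := by
          intro rest
          induction rest with
          | nil => intro _ res; rw [specLoop]; rfl
          | cons p rest ihp =>
            intro hsub res
            have hp : p ∈ palavras := hsub (List.mem_cons_self ..)
            have hpl : 0 < p.toList.length := by
              cases hq : p.toList with
              | nil =>
                exact absurd (by
                  rwa [show p = "" from String.toList_inj.mp (by simp [hq])] at hp) hno
              | cons c' l' => simp
            have hceq : (PySem.Str.slice frase (some ((j + c : Nat) : Int))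
                  (some (((j + c : Nat) : Int) + PySem.Str.len p)) == p) = true ↔
                (frase.toList.drop (j + c)).take p.toList.length = p.toList := by
              rw [beq_iff_eq, ← String.toList_inj]
              rw [PySem.Str.toList_slice, PySem.Chars.slice_eq_listSlice, PySem.Str.len_eq,
                PySem.List.slice_natCast_add]
            rw [List.foldl_cons, specLoop]
            by_cases hc2 : (frase.toList.drop (j + c)).take p.toList.length = p.toList
            · rw [if_pos (hceq.mpr hc2), dif_pos ⟨hc2, hpl⟩]
              have hplen : p.toList.length ≤ frase.toList.length - (j + c) := by
                have hL := congrArg List.length hc2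
                simp [List.length_take, List.length_drop, String.length_toList] at hL
                have e1 : p.toList.length = p.length := @String.length_toList p
                have e2 : frase.toList.length = frase.length := @String.length_toList frase
                omega
              have hcand : PySem.List.pyGetD t (((j + c : Nat) : Int) + PySem.Str.len p) "" =
                  specG frase palavras d0 (j + c + p.toList.length) := by
                rw [PySem.Str.len_eq,
                  show (((j + c : Nat) : Int) + (p.toList.length : Int)) =
                    ((j + c + p.toList.length : Nat) : Int) by push_cast; ring,
                  PySem.List.pyGetD_natCast]
                exact hidx _ (by omega) (by omega)
              rw [hcand]
              exact ihp (fun q hq => hsub (List.mem_cons_of_mem _ hq)) _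
            · rw [if_neg (fun hb => hc2 (hceq.mp hb)), dif_neg (fun hb => hc2 hb.1)]
              exact ihp (fun q hq => hsub (List.mem_cons_of_mem _ hq)) res
        refine ⟨by simp [hlen], ?_⟩
        intro idx h1 h2
        rcases Nat.eq_or_lt_of_le h1 with he | hlt
        · rw [← he]
          rw [List.getD_eq_getElem?_getD, List.getElem?_set, if_pos rfl, if_pos (by omega)]
          rw [hin palavras (fun _ h => h) ""]
          rw [specG, hkey, hg]
          rfl
        · rw [List.getD_eq_getElem?_getD, List.getElem?_set, if_neg (by omega),
            ← List.getD_eq_getElem?_getD]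
          exact hidx idx (by omega) h2
    have htail : (((j + c : Nat) : Int) - 1) = ((j : Int) + ((c : Nat) : Int) - 1) := by
      push_cast; ring
    rw [htail]
    exact ihc j _ (by omega) hstep.1 (fun idx h1 h2 => hstep.2 idx h1 h2)

-- ===== VERDICT (by name: the statement is the Claim_ definition above) =====
theorem auxMemo_spec : Claim_equal_auxMemo := by
  unfold Claim_equal_auxMemo Spec_auxMemo
  intro nova frase palavras ha _hdom hpre
  obtain ⟨hpre1, hOR⟩ := hpre
  unfold auxMemo auxMemo_alt
  cases hm : (PySem.Dict.mk ha).get? nova with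
  | some v =>
    rw [auxA]
    simp only [hm]
  | none =>
    simp only [hm]
    by_cases hsw : nova.toList <+: frase.toList
    · have hno : "" ∉ palavras := by
        intro hin
        rcases hpre1 hin with h | h
        · exact h hsw
        · rw [hm] at h; simp at h
      have hpre_t : nova.toList = frase.toList.take nova.toList.length :=
        List.prefix_iff_eq_take.mp hsw
      have hi : nova.toList.length ≤ frase.toList.length := hsw.length_le
      have hOK : ∀ p ∈ palavras, ' ' ∈ p.toList → ¬ p.toList <:+: frase.toList := by
        rcases hOR hsw with h | h
        · rw [hm] at h; simp at h
        · exact h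
      have hA : (auxA frase palavras (frase.toList.length + 1) nova (PySem.Dict.mk ha)).1 =
          specG frase palavras (PySem.Dict.mk ha) nova.toList.length := by
        have HC1 : ∀ (nv p : String), p ∈ palavras →
            (∃ s, nv.toList = nova.toList ++ s ∧ ' ' ∉ s) →
            (nv ++ p).toList <+: frase.toList →
            (∃ s, (nv ++ p).toList = nova.toList ++ s ∧ ' ' ∉ s) := by
          rintro nv p hp ⟨s0, hs0, hs0sp⟩ hpref
          have hpsf : ' ' ∉ p.toList := by
            intro hsp2
            apply hOK p hp hsp2
            have h1 : p.toList <:+: (nv ++ p).toList := by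
              rw [String.toList_append]; exact (List.suffix_append _ _).isInfix
            exact h1.trans hpref.isInfix
          refine ⟨s0 ++ p.toList, by rw [String.toList_append, hs0, List.append_assoc], ?_⟩
          intro hmem
          rcases List.mem_append.mp hmem with h1 | h2
          · exact hs0sp h1
          · exact hpsf h2
        have HC2 : ∀ (nv p : String), p ∈ palavras →
            (∃ s, nv.toList = nova.toList ++ s ∧ ' ' ∉ s) →
            ¬ (∃ s, (nv ++ " " ++ p).toList = nova.toList ++ s ∧ ' ' ∉ s) := by
          rintro nv p _ ⟨s0, hs0, hs0sp⟩ ⟨sk, hsk, hskp⟩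
          apply hskp
          have hkl : (nv ++ " " ++ p).toList = nova.toList ++ (s0 ++ ' ' :: p.toList) := by
            simp only [String.toList_append, hs0, List.append_assoc]
            simp [show (" " : String).toList = [' '] from by decide]
          rw [hkl] at hsk
          rw [← List.append_cancel_left hsk]
          simp
        exact (mainA frase palavras (PySem.Dict.mk ha)
          (fun k => ∃ s, k.toList = nova.toList ++ s ∧ ' ' ∉ s) hno HC1 HC2
          (frase.toList.length + 1) nova.toList.length nova (PySem.Dict.mk ha)
          hpre_t hi ⟨[], by simp, by simp⟩ (by omega) (fun k _ => Or.inl rfl)).1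
      have hsw' : PySem.Str.startswith frase nova = true := by
        rw [PySem.Str.startswith_eq]; exact (PySem.Chars.startswith_iff _ _).mpr hsw
      rw [if_pos hsw', hA]
      rw [PySem.Str.len_eq, PySem.Str.len_eq]
      rw [show PySem.List.pyRepeat [""] ((frase.toList.length : Int) + 1) =
          List.replicate (frase.toList.length + 1) "" by
        rw [PySem.List.pyRepeat_singleton,
          show ((frase.toList.length : Int) + 1).toNat = frase.toList.length + 1 by omega]]
      have hB := loopB frase palavras (PySem.Dict.mk ha) hno
        (frase.toList.length + 1 - nova.toList.length) nova.toList.length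
        (List.replicate (frase.toList.length + 1) "") (by omega) (by simp)
        (fun idx h1 h2 => by omega)
      rw [show ((frase.toList.length : Int)) =
          ((nova.toList.length : Int) +
            ((frase.toList.length + 1 - nova.toList.length : Nat) : Int) - 1) by omega]
      rw [PySem.List.pyGetD_natCast]
      exact (hB.2 nova.toList.length (le_refl _) hi).symm
    · have hsw' : PySem.Str.startswith frase nova = false := by
        rw [PySem.Str.startswith_eq]
        rw [← Bool.not_eq_true]
        intro hb
        exact hsw ((PySem.Chars.startswith_iff _ _).mp hb)
      rw [if_neg (by rw [hsw']; simp)]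
      rw [auxA]
      simp only [hm]
      have hnp : ∀ p ∈ palavras, ¬ ((nova ++ p).toList <+: frase.toList) := by
        intro p _ h
        apply hsw
        have hpp : nova.toList <+: (nova ++ p).toList := by
          rw [String.toList_append]; exact List.prefix_append _ _
        exact hpp.trans h
      rw [loopA_none frase palavras (frase.toList.length) nova palavras hnp [""]
        (PySem.Dict.mk ha)]
      rw [show (PySem.List.max? ([""] : List String) PySem.Str.len).getD "" = "" from rfl]
      rw [PySem.Dict.getD_insert_self]
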